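-- pv_equiv track=rewrite | github.com/Qazalbash/GradVault | SEM1/programming-fundamentals/final/no pair allowed.py | minimalOperations
-- ===== SOURCE A (Python) =====
-- def minimalOperations(words):
--     change = []
--     for i in range(len(words)):
--         w, index, cd = list(words[i]), 0, True
--         for j in range(len(w) - 1):
--             if cd == False:
--                 cd = True
--             elif w[j] == w[j + 1]:
--                 cd = False
--                 index += 1
--         change.append(index)
--     return change
-- ===== SOURCE B (Python) =====
-- def minimalOperations(words):
--     # Run-length decomposition: each maximal run of k equal characters needs k // 2 changes.
--     res = []
--     for w in words:
--         prev, run, total = None, 0, 0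
--         for ch in w:
--             if prev == ch:
--                 run += 1
--             else:
--                 total += run // 2
--                 prev, run = ch, 1
--         res.append(total + run // 2)
--     return res
-- ===== Notes on version B (the rewrite author's own statement) =====
-- stated objective: alternative
-- what changed: B counts via run lengths (maintaining the current character and its run length, summing run//2 per maximal run) instead of A's adjacent-pair scan with a skip flag.
import Mathlib
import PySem

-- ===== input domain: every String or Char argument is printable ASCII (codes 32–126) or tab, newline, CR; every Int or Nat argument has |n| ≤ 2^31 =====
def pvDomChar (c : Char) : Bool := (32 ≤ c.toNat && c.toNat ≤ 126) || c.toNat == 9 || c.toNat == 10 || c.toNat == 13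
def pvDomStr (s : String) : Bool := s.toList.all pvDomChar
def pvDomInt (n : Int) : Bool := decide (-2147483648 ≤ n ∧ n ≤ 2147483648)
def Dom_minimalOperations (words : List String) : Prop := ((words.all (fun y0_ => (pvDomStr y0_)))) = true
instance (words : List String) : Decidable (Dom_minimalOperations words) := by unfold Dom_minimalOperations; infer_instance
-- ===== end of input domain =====

-- B replaces A's adjacent-pair scan with a skip flag by a run-length scan summing run//2 per maximal run (alternative decomposition, same cost).


-- ===== PORT A =====
-- inner loop: 'for j in range(len(w)-1)' comparing w[j], w[j+1] with state (cd, index);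
-- rendered as the obvious structural recursion over adjacent pairs with the same state,
-- same comparisons in the same order.
def pvLoopA : List Char → Bool → Int → Int
  | a :: b :: rest, cd, index =>
    if cd = false then pvLoopA (b :: rest) true index
    else if a == b then pvLoopA (b :: rest) false (index + 1)
    else pvLoopA (b :: rest) cd index
  | _, _, index => index

def minimalOperations (words : List String) : List Int :=
  words.foldl (fun change w => change ++ [pvLoopA w.toList true 0]) []

-- ===== PORT B =====
def pvStep (st : Option Char × Int × Int) (ch : Char) : Option Char × Int × Int :=
  match st with
  | (prev, run, total) =>
    if prev == some ch then (prev, run + 1, total)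
    else (some ch, 1, total + PySem.Int.floordiv run 2)

def pvAltWord (w : List Char) : Int :=
  match w.foldl pvStep (none, 0, 0) with
  | (_, run, total) => total + PySem.Int.floordiv run 2

def minimalOperations_alt (words : List String) : List Int :=
  words.map (fun w => pvAltWord w.toList)

-- ===== PRECONDITION & SPEC =====
def Spec_minimalOperations (words : List String) (out : List Int) : Prop := out = minimalOperations_alt words
instance (words : List String) (out : List Int) : Decidable (Spec_minimalOperations words out) := by unfold Spec_minimalOperations; infer_instance

-- ===== CLAIM (what is proved, stated in full; the proofs are below) =====
def Claim_equal_minimalOperations : Prop := ∀ (words : List String), Dom_minimalOperations words → Spec_minimalOperations words (minimalOperations words)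

-- ===== LEMMAS AND PROOFS =====

theorem pv_fd2 (r : Int) (h : 0 ≤ r) : PySem.Int.floordiv r 2 = r / 2 :=
  PySem.Int.floordiv_eq_ediv_of_pos (by omega)

-- Invariant linking A's skip-flag state to B's run-length state:
-- after a run of length r (r ≥ 1) of character c, A's flag is 'r is odd' and A's
-- counter is B's flushed total plus r/2.
theorem pvLoopA_cons_false (a b : Char) (rest : List Char) (idx : Int) :
    pvLoopA (a :: b :: rest) false idx = pvLoopA (b :: rest) true idx := by
  simp [pvLoopA]

theorem pvLoopA_cons_true_eq (a : Char) (rest : List Char) (idx : Int) :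
    pvLoopA (a :: a :: rest) true idx = pvLoopA (a :: rest) false (idx + 1) := by
  simp [pvLoopA]

theorem pvLoopA_cons_true_ne (a b : Char) (rest : List Char) (idx : Int) (h : a ≠ b) :
    pvLoopA (a :: b :: rest) true idx = pvLoopA (b :: rest) true idx := by
  simp [pvLoopA, h]

theorem pv_key (xs : List Char) : ∀ (c : Char) (r t : Int), 1 ≤ r →
    pvLoopA (c :: xs) (decide (r % 2 = 1)) (t + r / 2) =
      (match List.foldl pvStep (some c, r, t) xs with
       | (_, run, total) => total + PySem.Int.floordiv run 2) := by
  induction xs with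
  | nil =>
    intro c r t hr
    simp [pvLoopA, pv_fd2 r (by omega)]
  | cons d xs ih =>
    intro c r t hr
    by_cases hdc : c = d
    · subst hdc
      by_cases hodd : r % 2 = 1
      · have h1 : (decide (r % 2 = 1)) = true := by simp [hodd]
        have h2 : (decide ((r + 1) % 2 = 1)) = false := by rw [decide_eq_false_iff_not]; omega
        have h3 : t + r / 2 + 1 = t + (r + 1) / 2 := by omega
        have := ih c (r + 1) t (by omega)
        rw [h2] at this
        rw [h1]
        rw [pvLoopA_cons_true_eq, h3, this]
        simp [pvStep]
      · have h1 : (decide (r % 2 = 1)) = false := by simp [hodd]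
        have h2 : (decide ((r + 1) % 2 = 1)) = true := by rw [decide_eq_true_eq]; omega
        have h3 : t + r / 2 = t + (r + 1) / 2 := by omega
        have := ih c (r + 1) t (by omega)
        rw [h2] at this
        rw [h1]
        rw [pvLoopA_cons_false, h3, this]
        simp [pvStep]
    · have hbeq : (c == d) = false := by simp [hdc]
      have hbeq2 : ((some c : Option Char) == some d) = false := by simp [hdc]
      have hL : pvLoopA (c :: d :: xs) (decide (r % 2 = 1)) (t + r / 2)
          = pvLoopA (d :: xs) true (t + r / 2) := by
        by_cases hodd : r % 2 = 1
        · rw [show (decide (r % 2 = 1)) = true by rw [decide_eq_true_eq]; omega,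
            pvLoopA_cons_true_ne c d xs _ hdc]
        · rw [show (decide (r % 2 = 1)) = false by rw [decide_eq_false_iff_not]; omega,
            pvLoopA_cons_false]
      have := ih d 1 (t + r / 2) (by omega)
      have h1 : (decide ((1 : Int) % 2 = 1)) = true := by decide
      rw [h1] at this
      have h3 : t + r / 2 + (1 : Int) / 2 = t + r / 2 := by omega
      rw [h3] at this
      rw [hL, this]
      simp [pvStep, hbeq2, pv_fd2 r (by omega)]

theorem pv_word (w : List Char) : pvLoopA w true 0 = pvAltWord w := by
  cases w with
  | nil => simp [pvLoopA, pvAltWord, PySem.Int.floordiv]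
  | cons c xs =>
    have := pv_key xs c 1 0 (by omega)
    have h1 : (decide ((1 : Int) % 2 = 1)) = true := by decide
    rw [h1] at this
    have h3 : (0 : Int) + 1 / 2 = 0 := by omega
    rw [h3] at this
    rw [this]
    simp [pvAltWord, pvStep]

theorem pv_fold (l : List String) : ∀ acc,
    l.foldl (fun change w => change ++ [pvLoopA w.toList true 0]) acc
      = acc ++ l.map (fun w => pvAltWord w.toList) := by
  induction l with
  | nil => intro acc; simp
  | cons w l ih => intro acc; rw [List.foldl_cons, ih, pv_word]; simp

-- ===== VERDICT (by name: the statement is the Claim_ definition above) =====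
theorem minimalOperations_spec : Claim_equal_minimalOperations := by
  intro words _
  show minimalOperations words = minimalOperations_alt words
  simpa [minimalOperations, minimalOperations_alt] using pv_fold words []
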